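-- pv_equiv track=rewrite | github.com/pypi-data/pypi-mirror-403 | packages/contextpilot/contextpilot-0.3.0-py3-none-any.whl/contextpilot/server/live_index.py | _schedule_incremental
-- ===== SOURCE A (Python) =====
-- from typing import List, Dict, Tuple, Optional, Any, Set
--
-- def _schedule_incremental(context_info: List[Tuple]) -> List[int]:
--     """
--     Schedule contexts for optimal execution based on search paths.
--
--     Groups contexts by path prefix and orders by path length descending
--     to maximize cache reuse.
--
--     Args:
--         context_info: List of (context_idx, request_id, search_path)
--
--     Returns:
--         List of context indices in scheduled execution order
--     """
--     # Group by first element of search path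
--     from collections import defaultdict
--     groups = defaultdict(list)
--
--     for ctx_idx, req_id, path in context_info:
--         if path:
--             group_key = path[0]
--         else:
--             group_key = -1  # Empty path
--         groups[group_key].append((ctx_idx, len(path)))
--
--     # Sort within each group by path length descending (longer paths first for cache reuse)
--     scheduled = []
--     for group_key in sorted(groups.keys()):
--         items = groups[group_key]
--         items.sort(key=lambda x: -x[1])
--         scheduled.extend([item[0] for item in items])
--
--     return scheduled
-- ===== SOURCE B (Python) =====
-- from typing import List, Tuple
--
--
-- def _schedule_incremental(context_info: List[Tuple]) -> List[int]:
--     """One global stable sort instead of grouping + per-group sorts.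
--
--     Annotate each context with (group_key, -path_length), sort once with
--     that tuple key (Python's sort is stable, so ties keep input order,
--     exactly as the grouped version preserves insertion order), and read
--     off the context indices.
--     """
--     keyed = [((path[0] if path else -1), -len(path), ctx_idx)
--              for ctx_idx, _req_id, path in context_info]
--     keyed.sort(key=lambda t: (t[0], t[1]))
--     return [t[2] for t in keyed]
-- ===== Notes on version B (the rewrite author's own statement) =====
-- stated objective: simpler
-- what changed: Replaces the defaultdict grouping plus a per-group sort per key with one pass that annotates each context with (group_key, -path_length) and a single stable sort on that tuple key, reading the indices off the sorted list.
import Mathlib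
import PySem

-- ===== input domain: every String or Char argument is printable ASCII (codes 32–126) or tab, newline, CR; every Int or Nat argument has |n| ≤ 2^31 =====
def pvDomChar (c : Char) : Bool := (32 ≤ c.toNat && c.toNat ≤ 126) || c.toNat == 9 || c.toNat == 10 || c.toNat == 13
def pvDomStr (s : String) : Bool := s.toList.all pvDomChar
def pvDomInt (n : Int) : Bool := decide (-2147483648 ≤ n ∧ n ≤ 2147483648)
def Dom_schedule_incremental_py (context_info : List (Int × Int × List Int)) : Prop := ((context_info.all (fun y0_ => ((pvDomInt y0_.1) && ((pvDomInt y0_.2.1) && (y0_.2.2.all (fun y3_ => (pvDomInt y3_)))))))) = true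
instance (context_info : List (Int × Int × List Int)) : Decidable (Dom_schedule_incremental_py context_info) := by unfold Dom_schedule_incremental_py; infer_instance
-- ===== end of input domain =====

-- B replaces A's defaultdict grouping + per-group sorts by one stable sort on the tuple key (group_key, -path_length); same result, simpler structure.


-- group_key = path[0] if path else -1  (both Pythons compute it with this same expression)
def pvGroupKey (p : List Int) : Int :=
  match p with
  | [] => -1
  | x :: _ => x

-- ===== PORT A =====
-- groups = defaultdict(list); for ctx_idx, req_id, path: groups[group_key].append((ctx_idx, len(path)))
-- for group_key in sorted(groups.keys()): items = groups[group_key]; items.sort(key=lambda x: -x[1]); scheduled.extend([item[0] for item in items])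
def schedule_incremental_py (context_info : List (Int × Int × List Int)) : List Int :=
  let groups : PySem.Dict Int (List (Int × Int)) :=
    context_info.foldl
      (fun d t =>
        d.modify (pvGroupKey t.2.2) [] (fun xs => xs ++ [(t.1, PySem.List.len t.2.2)]))
      PySem.Dict.empty
  (PySem.List.sorted groups.keys (fun k => k) false).foldl
    (fun scheduled group_key =>
      let items := groups.getD group_key []
      let items := PySem.List.sorted items (fun x => -x.2) false
      scheduled ++ items.map (fun item => item.1))
    []

-- ===== PORT B =====
-- keyed = [((path[0] if path else -1), -len(path), ctx_idx) for ...]; keyed.sort(key=lambda t: (t[0], t[1])); return [t[2] for t in keyed]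
def schedule_incremental_py_alt (context_info : List (Int × Int × List Int)) : List Int :=
  let keyed := context_info.map
    (fun t => (pvGroupKey t.2.2, -(PySem.List.len t.2.2), t.1))
  let keyed := PySem.List.sorted2 keyed (fun t => t.1) (fun t => t.2.1) false
  keyed.map (fun t => t.2.2)

-- ===== PRECONDITION & SPEC =====
def Spec_schedule_incremental_py (context_info : List (Int × Int × List Int)) (out : List Int) : Prop := out = schedule_incremental_py_alt context_info
instance (context_info : List (Int × Int × List Int)) (out : List Int) : Decidable (Spec_schedule_incremental_py context_info out) := by unfold Spec_schedule_incremental_py; infer_instance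

-- ===== CLAIM (what is proved, stated in full; the proofs are below) =====
def Claim_equal_schedule_incremental_py : Prop := ∀ (context_info : List (Int × Int × List Int)), Dom_schedule_incremental_py context_info → Spec_schedule_incremental_py context_info (schedule_incremental_py context_info)

-- ===== LEMMAS AND PROOFS =====

-- insertBy goes to the front when every element tests true
theorem pv_insertBy_all_true {α : Type} (b : α → α → Bool) (x : α) (zs : List α)
    (h : ∀ z ∈ zs, b x z = true) :
    PySem.List.insertBy b x zs = x :: zs := by
  cases zs with
  | nil => rfl
  | cons z zs => simp [PySem.List.insertBy, h z (by simp)]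

-- insertBy skips a prefix on which the test is false
theorem pv_insertBy_skip {α : Type} (b : α → α → Bool) (x : α) (ys zs : List α)
    (h : ∀ y ∈ ys, b x y = false) :
    PySem.List.insertBy b x (ys ++ zs) = ys ++ PySem.List.insertBy b x zs := by
  induction ys with
  | nil => rfl
  | cons y ys ih =>
      have hy : b x y = false := h y (by simp)
      simp only [List.cons_append, PySem.List.insertBy, hy, Bool.false_eq_true, if_false]
      exact congrArg (y :: ·) (ih (fun y hy => h y (by simp [hy])))

-- insertBy lands inside a segment followed by an all-true tail
theorem pv_insertBy_seg {α : Type} (b b' : α → α → Bool) (x : α) (g zs : List α)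
    (hcong : ∀ y ∈ g, b x y = b' x y) (htrue : ∀ z ∈ zs, b x z = true) :
    PySem.List.insertBy b x (g ++ zs) = PySem.List.insertBy b' x g ++ zs := by
  induction g with
  | nil =>
      simpa [PySem.List.insertBy] using pv_insertBy_all_true b x zs htrue
  | cons y g ih =>
      have hy : b x y = b' x y := hcong y (by simp)
      by_cases hb : b' x y = true
      · simp [PySem.List.insertBy, hy, hb]
      · have hb' : b' x y = false := by simpa using hb
        simp only [List.cons_append, PySem.List.insertBy, hy, hb', Bool.false_eq_true, if_false]
        exact congrArg (y :: ·) (ih (fun y hy => hcong y (by simp [hy])))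

-- insertBy commutes with map
theorem pv_insertBy_map {α β : Type} (b : β → β → Bool) (f : α → β) (x : α) (l : List α) :
    PySem.List.insertBy b (f x) (l.map f)
      = (PySem.List.insertBy (fun a c => b (f a) (f c)) x l).map f := by
  induction l with
  | nil => rfl
  | cons y l ih =>
      by_cases hb : b (f x) (f y) = true
      · simp [PySem.List.insertBy, hb]
      · have hb' : b (f x) (f y) = false := by simpa using hb
        simp [PySem.List.insertBy, hb', ih]

theorem pv_foldl_insertBy_map {α β : Type} (b : β → β → Bool) (f : α → β) (l : List α) :
    ∀ acc : List α,
      l.foldl (fun acc y => PySem.List.insertBy b (f y) acc) (acc.map f)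
        = (l.foldl (fun acc y => PySem.List.insertBy (fun a c => b (f a) (f c)) y acc) acc).map f := by
  induction l with
  | nil => intro acc; rfl
  | cons z l ih =>
      intro acc
      simp only [List.foldl_cons]
      rw [pv_insertBy_map, ih]

-- a stable sort commutes with map (the comparison reads only keys)
theorem pv_sorted_map {α β κ : Type} [LinearOrder κ] (f : α → β) (key : β → κ) (l : List α) :
    PySem.List.sorted (l.map f) key false
      = (PySem.List.sorted l (fun y => key (f y)) false).map f := by
  rw [PySem.List.sorted_eq_foldl_insertBy, PySem.List.sorted_eq_foldl_insertBy,
    List.foldl_map]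
  exact pv_foldl_insertBy_map (fun a c => decide (key a < key c)) f l []

-- sorted of a list with one element appended = insert the element into sorted of the list
theorem pv_sorted_append {α κ : Type} [LinearOrder κ] (key : α → κ) (L : List α) (x : α) :
    PySem.List.sorted (L ++ [x]) key false
      = PySem.List.insertBy (fun a b => decide (key a < key b)) x
          (PySem.List.sorted L key false) := by
  rw [PySem.List.sorted_eq_foldl_insertBy, PySem.List.sorted_eq_foldl_insertBy,
    List.foldl_append]
  rfl

theorem pv_sorted2_append {α : Type} (k1 k2 : α → Int) (L : List α) (x : α) :
    PySem.List.sorted2 (L ++ [x]) k1 k2 false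
      = PySem.List.insertBy
          (fun a b => decide (k1 a < k1 b) || (!decide (k1 b < k1 a) && decide (k2 a < k2 b)))
          x (PySem.List.sorted2 L k1 k2 false) := by
  simp [PySem.List.sorted2, List.foldl_append]

-- inserting with the lexicographic test into a concatenation of strictly key-increasing groups
theorem pv_insert_flatMap {α : Type} (k1 k2 : α → Int) (x : α) (G : Int → List α) :
    ∀ ks : List Int, ks.Pairwise (· < ·) → k1 x ∈ ks → (∀ k ∈ ks, ∀ y ∈ G k, k1 y = k) →
      PySem.List.insertBy
          (fun a b => decide (k1 a < k1 b) || (!decide (k1 b < k1 a) && decide (k2 a < k2 b)))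
          x (ks.flatMap G)
        = ks.flatMap (fun k =>
            if k = k1 x then
              PySem.List.insertBy (fun a b => decide (k2 a < k2 b)) x (G k)
            else G k) := by
  intro ks
  induction ks with
  | nil => intro _ hx _; simp at hx
  | cons k ks ih =>
      intro hpw hx hG
      have hk : ∀ k' ∈ ks, k < k' := by
        intro k' hk'; exact (List.pairwise_cons.mp hpw).1 k' hk'
      have hpw' : ks.Pairwise (· < ·) := (List.pairwise_cons.mp hpw).2
      have hGk : ∀ y ∈ G k, k1 y = k := hG k (by simp)
      have hG' : ∀ k' ∈ ks, ∀ y ∈ G k', k1 y = k' := by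
        intro k' hk' y hy; exact hG k' (by simp [hk']) y hy
      simp only [List.flatMap_cons]
      by_cases h : k = k1 x
      · have htrue : ∀ z ∈ ks.flatMap G,
            (decide (k1 x < k1 z) || (!decide (k1 z < k1 x) && decide (k2 x < k2 z))) = true := by
          intro z hz
          obtain ⟨k', hk', hzk'⟩ := List.mem_flatMap.mp hz
          have := hG' k' hk' z hzk'
          have hlt : k1 x < k1 z := by rw [this, ← h]; exact hk k' hk'
          simp [hlt]
        have hcong : ∀ y ∈ G k,
            (decide (k1 x < k1 y) || (!decide (k1 y < k1 x) && decide (k2 x < k2 y)))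
              = decide (k2 x < k2 y) := by
          intro y hy
          have := hGk y hy
          have h1 : ¬ k1 x < k1 y := by rw [this, ← h]; exact lt_irrefl k
          have h2 : ¬ k1 y < k1 x := by rw [this, ← h]; exact lt_irrefl k
          simp [h1, h2]
        rw [pv_insertBy_seg _ (fun a b => decide (k2 a < k2 b)) x _ _ hcong htrue, if_pos h]
        have htail : (ks.flatMap (fun k' =>
            if k' = k1 x then
              PySem.List.insertBy (fun a b => decide (k2 a < k2 b)) x (G k')
            else G k')) = ks.flatMap G := by
          apply List.flatMap_congr
          intro k' hk'
          have : k' ≠ k1 x := by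
            intro he; rw [← h] at he; exact absurd (he ▸ hk k' hk') (lt_irrefl k')
          simp [this]
        rw [htail]
      · have hx' : k1 x ∈ ks := by
          rcases List.mem_cons.mp hx with he | hm
          · exact absurd he.symm h
          · exact hm
        have hklt : k < k1 x := hk _ hx'
        have hfalse : ∀ y ∈ G k,
            (decide (k1 x < k1 y) || (!decide (k1 y < k1 x) && decide (k2 x < k2 y))) = false := by
          intro y hy
          have := hGk y hy
          have h1 : ¬ k1 x < k1 y := by rw [this]; exact not_lt.mpr (le_of_lt hklt)
          have h2 : k1 y < k1 x := by rw [this]; exact hklt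
          simp [h1, h2]
        rw [pv_insertBy_skip _ _ _ _ hfalse, ih hpw' hx' hG', if_neg h]

-- a stable sort on the tuple key (k1, k2): each k1-value in increasing order, the k2-stable sort of its group
theorem pv_sorted2_decompose {α : Type} (k1 k2 : α → Int) (ks : List Int)
    (hks : ks.Pairwise (· < ·)) :
    ∀ L : List α, (∀ x ∈ L, k1 x ∈ ks) →
      PySem.List.sorted2 L k1 k2 false
        = ks.flatMap (fun k => PySem.List.sorted (L.filter (fun y => k1 y == k)) k2 false) := by
  intro L
  induction L using List.reverseRecOn with
  | nil => intro _; simp [PySem.List.sorted2, PySem.List.sorted]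
  | append_singleton L x ih =>
      intro hmem
      have hmemL : ∀ y ∈ L, k1 y ∈ ks := fun y hy => hmem y (by simp [hy])
      have hx : k1 x ∈ ks := hmem x (by simp)
      have hGmem : ∀ k ∈ ks, ∀ y ∈ PySem.List.sorted (L.filter (fun z => k1 z == k)) k2 false,
          k1 y = k := by
        intro k _ y hy
        have := (PySem.List.mem_sorted _ _ _ _).mp hy
        exact by simpa using (List.mem_filter.mp this).2
      rw [pv_sorted2_append, ih hmemL,
        pv_insert_flatMap k1 k2 x _ ks hks hx hGmem]
      apply List.flatMap_congr
      intro k hk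
      by_cases h : k = k1 x
      · have hbeq : (k1 x == k) = true := by simp [h]
        rw [if_pos h, List.filter_append]
        simp only [List.filter_cons, List.filter_nil, hbeq, if_true]
        rw [pv_sorted_append]
      · have hbeq : (k1 x == k) = false := by
          rw [beq_eq_false_iff_ne]; omega
        rw [if_neg h, List.filter_append]
        simp [hbeq]

-- per-key group: A's (sort pairs by -len, take ctx) equals B's (sort triples by -len, take ctx)
theorem pv_group (ann : List (Int × Int × Int)) (k : Int) :
    (PySem.List.sorted ((ann.filter (fun p => p.1 == k)).map (fun p => p.2))
        (fun x => -x.2) false).map (fun item => item.1)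
      = (PySem.List.sorted ((ann.map (fun e => (e.1, -e.2.2, e.2.1))).filter
            (fun y => y.1 == k)) (fun t => t.2.1) false).map (fun t => t.2.2) := by
  rw [List.filter_map, pv_sorted_map, pv_sorted_map, List.map_map, List.map_map]
  rfl

theorem pv_main (ci : List (Int × Int × List Int)) :
    schedule_incremental_py ci = schedule_incremental_py_alt ci := by
  have hfold :
      (ci.map (fun t => (pvGroupKey t.2.2, t.1, PySem.List.len t.2.2))).foldl
          (fun d p => d.modify p.1 [] (fun xs => xs ++ [p.2])) PySem.Dict.empty
        = ci.foldl
            (fun d t => d.modify (pvGroupKey t.2.2) []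
              (fun xs => xs ++ [(t.1, PySem.List.len t.2.2)]))
            PySem.Dict.empty := by
    rw [List.foldl_map]
  have hkeys :
      (ci.foldl
          (fun d t => d.modify (pvGroupKey t.2.2) []
            (fun xs => xs ++ [(t.1, PySem.List.len t.2.2)]))
          PySem.Dict.empty).keys
        = PySem.Set.ofList (ci.map (fun t => pvGroupKey t.2.2)) := by
    have h := PySem.Dict.keys_foldl_modify_key ci (fun t => pvGroupKey t.2.2)
      ([] : List (Int × Int)) (fun _ t => fun xs => xs ++ [(t.1, PySem.List.len t.2.2)])
      PySem.Dict.empty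
    rw [show PySem.Dict.empty.keys = ([] : List Int) from rfl, PySem.Set.update_nil_left] at h
    exact h
  have hgetD : ∀ k : Int,
      (ci.foldl
          (fun d t => d.modify (pvGroupKey t.2.2) []
            (fun xs => xs ++ [(t.1, PySem.List.len t.2.2)]))
          PySem.Dict.empty).getD k []
        = ((ci.map (fun t => (pvGroupKey t.2.2, t.1, PySem.List.len t.2.2))).filter
            (fun p => p.1 == k)).map (fun p => p.2) := by
    intro k
    rw [← hfold, PySem.Dict.getD_foldl_modify_append]
    simp [PySem.Dict.getD_empty]
  have hcov : ∀ y ∈ ci.map (fun t => (pvGroupKey t.2.2, -(PySem.List.len t.2.2), t.1)),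
      y.1 ∈ PySem.List.sorted (PySem.Set.ofList (ci.map (fun t => pvGroupKey t.2.2)))
              (fun k => k) false := by
    intro y hy
    obtain ⟨t, ht, rfl⟩ := List.mem_map.mp hy
    rw [PySem.List.mem_sorted, PySem.Set.mem_ofList]
    exact List.mem_map.mpr ⟨t, ht, rfl⟩
  have hpw := PySem.List.sorted_ofList_pairwise_lt (ci.map (fun t => pvGroupKey t.2.2))
  have hA : schedule_incremental_py ci
      = (PySem.List.sorted
          (ci.foldl
            (fun d t => d.modify (pvGroupKey t.2.2) []
              (fun xs => xs ++ [(t.1, PySem.List.len t.2.2)]))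
            PySem.Dict.empty).keys (fun k => k) false).foldl
          (fun scheduled group_key =>
            scheduled ++
              (PySem.List.sorted
                ((ci.foldl
                  (fun d t => d.modify (pvGroupKey t.2.2) []
                    (fun xs => xs ++ [(t.1, PySem.List.len t.2.2)]))
                  PySem.Dict.empty).getD group_key [])
                (fun x => -x.2) false).map (fun item => item.1))
          [] := rfl
  have hB : schedule_incremental_py_alt ci
      = (PySem.List.sorted2
          (ci.map (fun t => (pvGroupKey t.2.2, -(PySem.List.len t.2.2), t.1)))
          (fun t => t.1) (fun t => t.2.1) false).map (fun t => t.2.2) := rfl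
  rw [hA, hkeys, PySem.List.foldl_append_eq_flatMap, List.nil_append, hB,
    pv_sorted2_decompose (fun t : Int × Int × Int => t.1) (fun t : Int × Int × Int => t.2.1) _ hpw _ hcov, List.map_flatMap]
  apply List.flatMap_congr
  intro k _
  rw [hgetD k,
    show ci.map (fun t => (pvGroupKey t.2.2, -(PySem.List.len t.2.2), t.1))
        = (ci.map (fun t => (pvGroupKey t.2.2, t.1, PySem.List.len t.2.2))).map
            (fun e => (e.1, -e.2.2, e.2.1)) from by rw [List.map_map]; rfl]
  exact pv_group _ k

-- ===== VERDICT (by name: the statement is the Claim_ definition above) =====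
theorem schedule_incremental_py_spec : Claim_equal_schedule_incremental_py := by
  intro ci _
  exact pv_main ci
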